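-- pv_equiv track=rewrite | github.com/nickdecodes/lottery-predict-project | lottery.py | compute_zone_ratio
-- ===== SOURCE A (Python) =====
-- import math
--
-- def compute_zone_ratio(numbers):
--     first_zone_count = 0
--     second_zone_count = 0
--     third_zone_count = 0
--
--     for num in numbers:
--         if 1 <= int(num) <= 12:
--             first_zone_count += 1
--         elif 12 < int(num) <= 24:
--             second_zone_count += 1
--         elif 25 <= int(num) <= 35:
--             third_zone_count += 1
--
--     # 计算分区个数的最大公约数
--     max_common_divisor = math.gcd(first_zone_count, math.gcd(second_zone_count, third_zone_count))
--
--     # 计算分区比值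
--     first_zone_ratio = first_zone_count // max_common_divisor
--     second_zone_ratio = second_zone_count // max_common_divisor
--     third_zone_ratio = third_zone_count // max_common_divisor
--
--     zone_ratio = (first_zone_ratio, second_zone_ratio, third_zone_ratio)
--     return zone_ratio
-- ===== SOURCE B (Python) =====
-- import math
--
-- def compute_zone_ratio(numbers):
--     nums = list(numbers)
--     first_zone_count = sum(1 for num in nums if 1 <= int(num) <= 12)
--     second_zone_count = sum(1 for num in nums if 12 < int(num) <= 24)
--     third_zone_count = sum(1 for num in nums if 25 <= int(num) <= 35)
--     max_common_divisor = math.gcd(first_zone_count, math.gcd(second_zone_count, third_zone_count))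
--     return (first_zone_count // max_common_divisor,
--             second_zone_count // max_common_divisor,
--             third_zone_count // max_common_divisor)
-- ===== Notes on version B (the rewrite author's own statement) =====
-- stated objective: alternative
-- what changed: Replaces A's single pass with a triple mutable-counter accumulator and if/elif chain by materializing the input once and computing each zone count in its own independent scan, then reducing by the gcd.
import Mathlib
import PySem

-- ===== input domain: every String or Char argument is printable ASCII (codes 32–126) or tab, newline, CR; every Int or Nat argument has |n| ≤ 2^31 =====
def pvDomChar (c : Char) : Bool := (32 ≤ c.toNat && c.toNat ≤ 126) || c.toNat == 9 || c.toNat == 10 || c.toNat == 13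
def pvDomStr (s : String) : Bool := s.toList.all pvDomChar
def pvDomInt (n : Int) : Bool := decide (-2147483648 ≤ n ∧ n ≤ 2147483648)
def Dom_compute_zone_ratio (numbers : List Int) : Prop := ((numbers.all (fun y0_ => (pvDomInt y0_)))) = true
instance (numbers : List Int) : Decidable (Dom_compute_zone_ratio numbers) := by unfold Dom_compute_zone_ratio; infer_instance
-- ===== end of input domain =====

-- B computes the three zone counts in three independent scans instead of A's single triple-accumulator pass; same O(n) cost (objective: alternative).


-- ===== PORT A =====
def compute_zone_ratio (numbers : List Int) : Int × Int × Int :=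
  let c := numbers.foldl (fun (s : Int × Int × Int) num =>
    if 1 ≤ num ∧ num ≤ 12 then (s.1 + 1, s.2.1, s.2.2)
    else if 12 < num ∧ num ≤ 24 then (s.1, s.2.1 + 1, s.2.2)
    else if 25 ≤ num ∧ num ≤ 35 then (s.1, s.2.1, s.2.2 + 1)
    else s) (0, 0, 0)
  let g : Int := Int.gcd c.1 (Int.gcd c.2.1 c.2.2)
  (PySem.Int.floordiv c.1 g, PySem.Int.floordiv c.2.1 g, PySem.Int.floordiv c.2.2 g)

-- ===== PORT B =====
def compute_zone_ratio_alt (numbers : List Int) : Int × Int × Int :=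
  let nums := numbers
  let first : Int := nums.countP (fun n => decide (1 ≤ n ∧ n ≤ 12))
  let second : Int := nums.countP (fun n => decide (12 < n ∧ n ≤ 24))
  let third : Int := nums.countP (fun n => decide (25 ≤ n ∧ n ≤ 35))
  let g : Int := Int.gcd first (Int.gcd second third)
  (PySem.Int.floordiv first g, PySem.Int.floordiv second g, PySem.Int.floordiv third g)

-- ===== PRECONDITION & SPEC =====
-- Pre_ excludes exactly the inputs with no number in 1..35: there all three counts are 0,
-- the gcd is 0 and both A and B raise ZeroDivisionError.
def Pre_compute_zone_ratio (numbers : List Int) : Prop :=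
  (numbers.any (fun n => decide (1 ≤ n ∧ n ≤ 35))) = true
instance (numbers : List Int) : Decidable (Pre_compute_zone_ratio numbers) := by
  unfold Pre_compute_zone_ratio; infer_instance
def pvWitness_compute_zone_ratio : List Int := [3, 17, 30, 30]
def Spec_compute_zone_ratio (numbers : List Int) (out : Int × Int × Int) : Prop := out = compute_zone_ratio_alt numbers
instance (numbers : List Int) (out : Int × Int × Int) : Decidable (Spec_compute_zone_ratio numbers out) := by unfold Spec_compute_zone_ratio; infer_instance

-- ===== CLAIM (what is proved, stated in full; the proofs are below) =====
def Claim_equal_compute_zone_ratio : Prop := ∀ (numbers : List Int), Dom_compute_zone_ratio numbers → Pre_compute_zone_ratio numbers → Spec_compute_zone_ratio numbers (compute_zone_ratio numbers)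

-- ===== LEMMAS AND PROOFS =====
theorem czr_fold_counts (numbers : List Int) (a b c : Int) :
    numbers.foldl (fun (s : Int × Int × Int) num =>
      if 1 ≤ num ∧ num ≤ 12 then (s.1 + 1, s.2.1, s.2.2)
      else if 12 < num ∧ num ≤ 24 then (s.1, s.2.1 + 1, s.2.2)
      else if 25 ≤ num ∧ num ≤ 35 then (s.1, s.2.1, s.2.2 + 1)
      else s) (a, b, c)
    = (a + numbers.countP (fun n => decide (1 ≤ n ∧ n ≤ 12)),
       b + numbers.countP (fun n => decide (12 < n ∧ n ≤ 24)),
       c + numbers.countP (fun n => decide (25 ≤ n ∧ n ≤ 35))) := by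
  induction numbers generalizing a b c with
  | nil => simp
  | cons x xs ih =>
    simp only [List.foldl_cons, List.countP_cons]
    by_cases h1 : 1 ≤ x ∧ x ≤ 12
    · have n2 : ¬(12 < x ∧ x ≤ 24) := by omega
      have n3 : ¬(25 ≤ x ∧ x ≤ 35) := by omega
      simp [h1, n2, n3, ih, Prod.ext_iff]
      push_cast
      omega
    · by_cases h2 : 12 < x ∧ x ≤ 24
      · have n3 : ¬(25 ≤ x ∧ x ≤ 35) := by omega
        simp [h1, h2, n3, ih, Prod.ext_iff]
        push_cast
        omega
      · by_cases h3 : 25 ≤ x ∧ x ≤ 35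
        · simp [h1, h2, h3, ih, Prod.ext_iff]
          push_cast
          omega
        · simp [h1, h2, h3, ih]

-- ===== VERDICT (by name: the statement is the Claim_ definition above) =====
theorem compute_zone_ratio_spec : Claim_equal_compute_zone_ratio := by
  intro numbers _ _
  unfold Spec_compute_zone_ratio compute_zone_ratio compute_zone_ratio_alt
  simp [czr_fold_counts]
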